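-- pv_equiv track=rewrite | github.com/daniel-reich/ubiquitous-fiesta | YRwZvg5Pkgw4pEWC5_4.py | flick_switch
-- ===== SOURCE A (Python) =====
-- def flick_switch(lst):
--   if lst:
--     A=[]
--     for x in lst:
--       if x!='flick':
--         A.append(True)
--       else:
--         A.append(False)
--     B=[]
--     B.append(A[0])
--     for i in range(1, len(A)):
--       B.append(B[-1]==A[i])
--     return B
--   return []
-- ===== SOURCE B (Python) =====
-- def flick_switch(lst):
--   if not lst:
--     return []
--   state = lst[0] != 'flick'
--   out = [state]
--   for x in lst[1:]:
--     if x == 'flick':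
--       state = not state
--     out.append(state)
--   return out
-- ===== Notes on version B (the rewrite author's own statement) =====
-- stated objective: simpler
-- what changed: Replaces A's two passes (map every element to a bool list, then a second indexed loop comparing B[-1] with A[i]) by one fused pass maintaining a single boolean toggle state flipped on 'flick'.
import Mathlib
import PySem

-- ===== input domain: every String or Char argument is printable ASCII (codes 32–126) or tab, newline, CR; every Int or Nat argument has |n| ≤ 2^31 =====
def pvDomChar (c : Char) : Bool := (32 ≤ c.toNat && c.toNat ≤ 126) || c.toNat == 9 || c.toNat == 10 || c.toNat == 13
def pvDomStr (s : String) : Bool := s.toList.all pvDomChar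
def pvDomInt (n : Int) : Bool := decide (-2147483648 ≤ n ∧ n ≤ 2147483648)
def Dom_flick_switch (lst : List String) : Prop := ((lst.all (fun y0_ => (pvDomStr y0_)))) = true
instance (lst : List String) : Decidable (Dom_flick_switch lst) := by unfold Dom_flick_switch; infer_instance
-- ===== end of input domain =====

-- B replaces A's two passes (map to a bool list, then an indexed loop comparing B[-1] with A[i])
-- by one fused pass over the tail maintaining a single toggle bit flipped on 'flick'.

-- ===== PORT A =====
-- literal transliteration of A: build list A by a first loop, then B by an indexed second loop;
-- B[-1] and A[i] are ported with pyGet? (the .getD default is never taken: both indices are always in range)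
def flick_switch (lst : List String) : List Bool :=
  if lst ≠ [] then
    let A := lst.foldl (fun acc x => if x ≠ "flick" then acc ++ [true] else acc ++ [false]) []
    let B := [] ++ [(PySem.List.pyGet? A 0).getD true]
    (PySem.List.pyRange 1 (A.length : Int) 1).foldl
      (fun B i => B ++ [((PySem.List.pyGet? B (-1)).getD true == (PySem.List.pyGet? A i).getD true)]) B
  else []

-- ===== PORT B =====
def flick_switch_alt (lst : List String) : List Bool :=
  match lst with
  | [] => []
  | x :: rest =>
    let state := x != "flick"
    (rest.foldl (fun (p : List Bool × Bool) y =>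
        let st := if y == "flick" then !p.2 else p.2
        (p.1 ++ [st], st)) ([state], state)).1

-- ===== PRECONDITION & SPEC =====
def Spec_flick_switch (lst : List String) (out : List Bool) : Prop := out = flick_switch_alt lst
instance (lst : List String) (out : List Bool) : Decidable (Spec_flick_switch lst out) := by unfold Spec_flick_switch; infer_instance

-- ===== CLAIM (what is proved, stated in full; the proofs are below) =====
def Claim_equal_flick_switch : Prop := ∀ (lst : List String), Dom_flick_switch lst → Spec_flick_switch lst (flick_switch lst)

-- ===== LEMMAS AND PROOFS =====

-- the two loop bodies agree step by step: A's second loop over the mapped bools equals B's fused fold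
theorem flick_loop_eq (rest : List String) (acc : List Bool) (st : Bool) :
    ((rest.map (fun x => x != "flick")).foldl
        (fun B a => B ++ [((PySem.List.pyGet? B (-1)).getD true == a)]) (acc ++ [st]))
    = (rest.foldl (fun (p : List Bool × Bool) y =>
        let s := if y == "flick" then !p.2 else p.2
        (p.1 ++ [s], s)) (acc ++ [st], st)).1 := by
  induction rest generalizing acc st with
  | nil => simp
  | cons y ys ih =>
    simp only [List.map_cons, List.foldl_cons]
    have hlast : (PySem.List.pyGet? (acc ++ [st]) (-1)).getD true = st := by
      simp [PySem.List.pyGet?_neg_one]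
    rw [hlast]
    have hstep : (st == (y != "flick")) = (if y == "flick" then !st else st) := by
      by_cases h : y = "flick" <;> cases st <;> simp [h]
    rw [hstep]
    have := ih (acc ++ [st]) (if y == "flick" then !st else st)
    simpa [List.append_assoc] using this

-- ===== VERDICT (by name: the statement is the Claim_ definition above) =====
theorem flick_switch_spec : Claim_equal_flick_switch := by
  intro lst _
  unfold Spec_flick_switch flick_switch flick_switch_alt
  match lst with
  | [] => simp
  | x :: rest =>
    simp only [ne_eq, reduceCtorEq, not_false_eq_true, if_pos]
    have hA : (x :: rest).foldl
        (fun acc y => if y ≠ "flick" then acc ++ [true] else acc ++ [false]) ([] : List Bool)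
        = (x :: rest).map (fun y => y != "flick") := by
      have h : ∀ (l : List String) (a : List Bool),
          l.foldl (fun acc y => if y ≠ "flick" then acc ++ [true] else acc ++ [false]) a
            = a ++ l.map (fun y => y != "flick") := by
        intro l
        induction l with
        | nil => simp
        | cons z zs ih =>
          intro a
          simp only [List.foldl_cons]
          by_cases hz : z = "flick"
          · rw [if_neg (by simp [hz]), ih]; simp [hz]
          · rw [if_pos (by simp [hz]), ih]; simp [hz]
      simpa using h (x :: rest) []
    rw [hA]
    have hlen : (((x :: rest).map (fun y => y != "flick")).length : Int) = 1 + rest.length := by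
      simp; omega
    rw [hlen]
    have hrange : PySem.List.pyRange 1 (1 + (rest.length : Int)) 1
        = PySem.List.pyRange 1 ((rest.length : Int) + 1) 1 := by ring_nf
    rw [hrange]
    have hfold' : (PySem.List.pyRange 1 ((rest.length : Int) + 1) 1).foldl
        (fun B i => B ++ [((PySem.List.pyGet? B (-1)).getD true
            == (PySem.List.pyGetD ((x :: rest).map (fun y => y != "flick")) i true))])
        ([] ++ [(PySem.List.pyGet? ((x :: rest).map (fun y => y != "flick")) 0).getD true])
        = (((x :: rest).map (fun y => y != "flick")).drop 1).foldl
            (fun B a => B ++ [((PySem.List.pyGet? B (-1)).getD true == a)])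
            ([] ++ [(PySem.List.pyGet? ((x :: rest).map (fun y => y != "flick")) 0).getD true]) := by
      have h1 : ((rest.length : Int) + 1) = ((x :: rest).map (fun y => y != "flick")).length := by
        simp
      rw [h1, ← PySem.List.len_eq]
      simpa using PySem.List.foldl_pyRange_pyGetD ((x :: rest).map (fun y => y != "flick")) true
        (fun B a => B ++ [((PySem.List.pyGet? B (-1)).getD true == a)])
        ([] ++ [(PySem.List.pyGet? ((x :: rest).map (fun y => y != "flick")) 0).getD true])
        (a := 1) (by norm_num)
    simp only [PySem.List.pyGetD] at hfold'
    rw [hfold']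
    simp only [List.map_cons, List.drop_succ_cons, List.drop_zero]
    have h0 : PySem.List.pyGetD ((x != "flick") :: rest.map (fun y => y != "flick")) 0 true
        = (x != "flick") := PySem.List.pyGetD_zero_cons _ _ _
    simp only [PySem.List.pyGetD] at h0
    rw [h0]
    have := flick_loop_eq rest [] (x != "flick")
    simpa using this
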